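-- pv_equiv track=rewrite | github.com/clovispuc/Trabalho_final | src/validators.py | _mask_digits_preserving_format
-- ===== SOURCE A (Python) =====
-- def _mask_digits_preserving_format(block: str, keep: int = 4) -> str:
--     digits = [c for c in block if c.isdigit()]
--     if len(digits) <= keep:
--         return block
--
--     masked_digits = []
--     for idx, digit in enumerate(digits):
--         if idx < len(digits) - keep:
--             masked_digits.append("*")
--         else:
--             masked_digits.append(digit)
--
--     rebuilt = []
--     digit_idx = 0
--     for ch in block:
--         if ch.isdigit():
--             rebuilt.append(masked_digits[digit_idx])
--             digit_idx += 1
--         else: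
--             rebuilt.append(ch)
--     return "".join(rebuilt)
-- ===== SOURCE B (Python) =====
-- def _mask_digits_preserving_format(block: str, keep: int = 4) -> str:
--     out = []
--     counter = keep
--     for ch in reversed(block):
--         if ch.isdigit():
--             if counter > 0:
--                 out.append(ch)
--                 counter -= 1
--             else:
--                 out.append("*")
--         else:
--             out.append(ch)
--     out.reverse()
--     return "".join(out)
-- ===== Notes on version B (the rewrite author's own statement) =====
-- stated objective: simpler
-- what changed: Single right-to-left pass with a keep-counter replaces A's three passes (collect digits, build masked digit list, rebuild by index); the len(digits)<=keep guard disappears because the counter never runs out then.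
import Mathlib
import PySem

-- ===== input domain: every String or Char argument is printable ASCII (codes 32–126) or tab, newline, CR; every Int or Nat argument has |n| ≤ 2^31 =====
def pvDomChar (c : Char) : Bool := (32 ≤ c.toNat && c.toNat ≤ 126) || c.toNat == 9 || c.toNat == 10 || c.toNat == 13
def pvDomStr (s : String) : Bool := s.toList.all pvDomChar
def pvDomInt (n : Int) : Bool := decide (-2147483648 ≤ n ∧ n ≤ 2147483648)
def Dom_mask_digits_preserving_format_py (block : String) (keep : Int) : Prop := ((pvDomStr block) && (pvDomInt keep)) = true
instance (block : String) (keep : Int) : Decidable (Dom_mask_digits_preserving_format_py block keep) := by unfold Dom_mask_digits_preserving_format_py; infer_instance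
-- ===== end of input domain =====

-- B replaces A's three passes by one right-to-left pass with a keep-counter (objective: simpler).

-- ===== PORT A =====
-- the `for idx, digit in enumerate(digits)` loop building masked_digits
def pvMaskLoop (n keep : Int) : List Char → Int → List Char
  | [], _ => []
  | d :: ds, idx => (if idx < n - keep then '*' else d) :: pvMaskLoop n keep ds (idx + 1)

-- the rebuild loop; masked_digits[digit_idx] is always in range in A, so getD's default is unreachable
def pvRebuild (md : List Char) : List Char → Nat → List Char
  | [], _ => []
  | ch :: rest, i =>
      if PySem.Chars.isdigit ch then md.getD i ch :: pvRebuild md rest (i + 1)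
      else ch :: pvRebuild md rest i

def mask_digits_preserving_format_py (block : String) (keep : Int) : String :=
  let digits := block.toList.filter (fun c => PySem.Chars.isdigit c)
  if (digits.length : Int) ≤ keep then block
  else String.ofList (pvRebuild (pvMaskLoop (digits.length : Int) keep digits 0) block.toList 0)

-- ===== PORT B =====
-- B's single loop over reversed(block), counter carried as a parameter
def pvMaskRev (keep : Int) : List Char → List Char
  | [] => []
  | ch :: rest =>
      if PySem.Chars.isdigit ch then
        if 0 < keep then ch :: pvMaskRev (keep - 1) rest
        else '*' :: pvMaskRev keep rest
      else ch :: pvMaskRev keep rest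

def mask_digits_preserving_format_py_alt (block : String) (keep : Int) : String :=
  String.ofList ((pvMaskRev keep block.toList.reverse).reverse)

-- ===== PRECONDITION & SPEC =====
def Spec_mask_digits_preserving_format_py (block : String) (keep : Int) (out : String) : Prop := out = mask_digits_preserving_format_py_alt block keep
instance (block : String) (keep : Int) (out : String) : Decidable (Spec_mask_digits_preserving_format_py block keep out) := by unfold Spec_mask_digits_preserving_format_py; infer_instance

-- ===== CLAIM (what is proved, stated in full; the proofs are below) =====
def Claim_equal_mask_digits_preserving_format_py : Prop := ∀ (block : String) (keep : Int), Dom_mask_digits_preserving_format_py block keep → Spec_mask_digits_preserving_format_py block keep (mask_digits_preserving_format_py block keep)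

-- ===== LEMMAS AND PROOFS =====

-- number of digit characters in a list
def pvDC (l : List Char) : Nat := (l.filter (fun c => PySem.Chars.isdigit c)).length

-- the common specification both ports are proved equal to:
-- a digit is kept iff the number of digits from it to the end is ≤ keep
def pvSpec (keep : Int) : List Char → List Char
  | [] => []
  | x :: xs =>
      (if PySem.Chars.isdigit x then (if (pvDC (x :: xs) : Int) ≤ keep then x else '*') else x)
        :: pvSpec keep xs

-- counter value after processing a block containing d digits, started at c
def pvAfter (c : Int) (d : Nat) : Int := if c ≤ 0 then c else max (c - d) 0

def pvStep (x : Char) (c : Int) : Char :=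
  if PySem.Chars.isdigit x then (if 0 < c then x else '*') else x

lemma pvDC_cons (x : Char) (xs : List Char) :
    pvDC (x :: xs) = (if PySem.Chars.isdigit x then pvDC xs + 1 else pvDC xs) := by
  simp [pvDC, List.filter_cons]
  split_ifs <;> simp

lemma pvMaskRev_append (c : Int) (r : List Char) (x : Char) :
    pvMaskRev c (r ++ [x]) = pvMaskRev c r ++ [pvStep x (pvAfter c (pvDC r))] := by
  induction r generalizing c with
  | nil => simp [pvMaskRev, pvStep, pvAfter, pvDC]; split_ifs <;> simp_all
  | cons y r ih =>
      simp only [List.cons_append, pvMaskRev, pvDC_cons]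
      by_cases hy : PySem.Chars.isdigit y = true
      · by_cases hc : 0 < c
        · have : pvAfter c (pvDC r + 1) = pvAfter (c - 1) (pvDC r) := by
            simp [pvAfter]; split_ifs <;> omega
          simp [hy, hc, ih, this]
        · have : pvAfter c (pvDC r + 1) = pvAfter c (pvDC r) := by
            simp [pvAfter]; split_ifs <;> omega
          simp [hy, hc, ih, this]
      · simp [hy, ih]

lemma pvDC_reverse (l : List Char) : pvDC l.reverse = pvDC l := by
  simp [pvDC]

lemma pvB_eq_spec (c : Int) (l : List Char) :
    (pvMaskRev c l.reverse).reverse = pvSpec c l := by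
  induction l generalizing c with
  | nil => simp [pvMaskRev, pvSpec]
  | cons x xs ih =>
      have h1 : (x :: xs).reverse = xs.reverse ++ [x] := by simp
      rw [h1, pvMaskRev_append, pvDC_reverse]
      simp only [List.reverse_append, List.reverse_cons, List.reverse_nil, List.nil_append,
        List.singleton_append, ih]
      show pvStep x (pvAfter c (pvDC xs)) :: _ = pvSpec c (x :: xs)
      congr 1
      simp only [pvStep, pvAfter, pvDC_cons]
      by_cases hx : PySem.Chars.isdigit x = true
      · simp only [hx, if_true]
        split_ifs <;> (try rfl) <;> omega
      · simp [hx]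

lemma pvSpec_of_le (c : Int) (l : List Char) (h : (pvDC l : Int) ≤ c) :
    pvSpec c l = l := by
  induction l with
  | nil => rfl
  | cons x xs ih =>
      have hx := pvDC_cons x xs
      have hxs : (pvDC xs : Int) ≤ c := by split_ifs at hx <;> omega
      by_cases h1 : PySem.Chars.isdigit x = true
      · simp [pvSpec, ih hxs, h1, h]
      · simp [pvSpec, ih hxs, h1]

lemma pvMaskLoop_getD (n keep : Int) (ds : List Char) (j : Int) (i : Nat) (d : Char)
    (hi : i < ds.length) :
    (pvMaskLoop n keep ds j).getD i d
      = if (j + i : Int) < n - keep then '*' else ds.getD i d := by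
  induction ds generalizing j i with
  | nil => simp at hi
  | cons y ys ih =>
      cases i with
      | zero => simp [pvMaskLoop]
      | succ i =>
          simp only [pvMaskLoop, List.getD_cons_succ]
          rw [ih (j + 1) i (by simpa using hi)]
          have : (j + 1 + i : Int) = j + (i + 1 : Nat) := by push_cast; ring
          rw [this]

lemma pvRebuild_eq_spec (keep : Int) (D : List Char) :
    ∀ (l : List Char) (i : Nat),
      D.drop i = l.filter (fun c => PySem.Chars.isdigit c) →
      pvRebuild (pvMaskLoop (D.length : Int) keep D 0) l i = pvSpec keep l := by
  intro l
  induction l with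
  | nil => intro i _; rfl
  | cons x xs ih =>
      intro i hH
      by_cases hx : PySem.Chars.isdigit x = true
      · have hfil : (x :: xs).filter (fun c => PySem.Chars.isdigit c)
            = x :: xs.filter (fun c => PySem.Chars.isdigit c) := by
          simp [hx]
        rw [hfil] at hH
        have hlen : D.length - i = pvDC xs + 1 := by
          have := congrArg List.length hH
          simpa [pvDC] using this
        have hi : i < D.length := by omega
        have hget : D.getD i x = x := by
          have : D.drop i = x :: xs.filter (fun c => PySem.Chars.isdigit c) := hH
          have h0 : (D.drop i).getD 0 x = x := by rw [this]; rfl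
          simpa [List.getD_eq_getElem?_getD, List.getElem?_drop] using h0
        have hnext : D.drop (i + 1) = xs.filter (fun c => PySem.Chars.isdigit c) := by
          have : D.drop (i + 1) = (D.drop i).drop 1 := by
            rw [List.drop_drop]
          rw [this, hH]; rfl
        simp only [pvRebuild, pvSpec, hx, if_true]
        rw [ih (i + 1) hnext]
        congr 1
        rw [pvMaskLoop_getD _ _ _ _ _ x hi]
        have hdc : pvDC (x :: xs) = pvDC xs + 1 := by simp [pvDC_cons, hx]
        rw [hget, hdc]
        split_ifs with h1 h2 <;> (try rfl) <;> simp at h1 <;> omega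
      · have hfil : (x :: xs).filter (fun c => PySem.Chars.isdigit c)
            = xs.filter (fun c => PySem.Chars.isdigit c) := by
          simp [hx]
        rw [hfil] at hH
        simp only [pvRebuild, pvSpec, hx, if_false, Bool.false_eq_true]
        rw [ih i hH]

-- ===== VERDICT (by name: the statement is the Claim_ definition above) =====
theorem mask_digits_preserving_format_py_spec : Claim_equal_mask_digits_preserving_format_py := by
  intro block keep _
  unfold Spec_mask_digits_preserving_format_py
  unfold mask_digits_preserving_format_py mask_digits_preserving_format_py_alt
  rw [pvB_eq_spec]
  by_cases h : ((block.toList.filter (fun c => PySem.Chars.isdigit c)).length : Int) ≤ keep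
  · simp only [h, if_true]
    rw [pvSpec_of_le keep block.toList (by simpa [pvDC] using h)]
    exact String.ofList_toList.symm
  · simp only [h, if_false]
    rw [pvRebuild_eq_spec keep _ block.toList 0 (by simp)]
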